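-- pv_equiv track=rewrite | github.com/weilunn97/Google-OA-2020 | decreasing_subsequences.py | decreasing_subsequences
-- ===== SOURCE A (Python) =====
-- from bisect import bisect_right
-- from typing import List
--
-- def decreasing_subsequences(arr: List[int]) -> int:
--     """
--     Time  : O(N log N)
--     Space : O(N)
--     """
--
--     # EDGE CASE
--     if len(arr) < 2:
--         return len(arr)
--
--     # SETUP A LIST OF THE TAILS OF EACH SUBSEQUENCE
--     tails = []
--
--     for num in arr:
--         pos = bisect_right(tails, num)
--
--         if pos == len(tails):
--             tails.append(num)
--         else:
--             tails[pos] = num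
--
--     return len(tails)
-- ===== SOURCE B (Python) =====
-- def decreasing_subsequences(arr):
--     # O(n^2) dynamic programming over longest non-decreasing subsequence lengths.
--     dp = []  # pairs (value, length of longest non-decreasing subsequence ending at it)
--     for num in arr:
--         best = 0
--         for v, d in dp:
--             if v <= num and d > best:
--                 best = d
--         dp.append((num, best + 1))
--     best_total = 0
--     for v, d in dp:
--         if d > best_total:
--             best_total = d
--     return best_total
-- ===== Notes on version B (the rewrite author's own statement) =====
-- stated objective: alternative
-- what changed: Replaced the greedy patience-piles construction with bisect_right by a quadratic dynamic program that computes, for each element, the length of the longest non-decreasing subsequence ending there and returns the maximum.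
import Mathlib
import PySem

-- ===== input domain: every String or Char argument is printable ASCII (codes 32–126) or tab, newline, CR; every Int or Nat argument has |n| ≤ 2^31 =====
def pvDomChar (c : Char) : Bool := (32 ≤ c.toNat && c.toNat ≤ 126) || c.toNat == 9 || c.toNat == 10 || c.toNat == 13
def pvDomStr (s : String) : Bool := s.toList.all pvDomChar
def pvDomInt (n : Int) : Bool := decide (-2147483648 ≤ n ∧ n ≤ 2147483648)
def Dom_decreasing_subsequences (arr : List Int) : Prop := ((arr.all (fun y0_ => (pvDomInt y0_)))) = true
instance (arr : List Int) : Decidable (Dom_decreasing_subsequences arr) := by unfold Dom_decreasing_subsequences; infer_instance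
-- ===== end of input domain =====

-- B replaces the greedy patience-piles/bisect construction by a quadratic DP over
-- longest-non-decreasing-subsequence lengths; same return value, no speed claim.

-- ===== PORT A =====
-- bisect.bisect_right is a library call; A only ever applies it to `tails`, which it
-- keeps sorted, and on a sorted list bisect_right x = number of leading elements ≤ x.
def pvBisectRight (a : List Int) (x : Int) : Nat :=
  (a.takeWhile (fun t => decide (t ≤ x))).length

def pvStepA (tails : List Int) (num : Int) : List Int :=
  let pos := pvBisectRight tails num
  if pos = tails.length then tails ++ [num] else tails.set pos num

def decreasing_subsequences (arr : List Int) : Int :=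
  if arr.length < 2 then (arr.length : Int)
  else ((arr.foldl pvStepA []).length : Int)

-- ===== PORT B =====
-- dp is the list of pairs (value, length of the longest non-decreasing subsequence
-- ending at that value), built left to right by an inner scan of dp.
def pvStepB (dp : List (Int × Int)) (num : Int) : List (Int × Int) :=
  let best := dp.foldl (fun b vd => if vd.1 ≤ num ∧ b < vd.2 then vd.2 else b) 0
  dp ++ [(num, best + 1)]

def decreasing_subsequences_alt (arr : List Int) : Int :=
  (arr.foldl pvStepB []).foldl (fun b vd => if b < vd.2 then vd.2 else b) 0

-- ===== PRECONDITION & SPEC =====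
def Spec_decreasing_subsequences (arr : List Int) (out : Int) : Prop := out = decreasing_subsequences_alt arr
instance (arr : List Int) (out : Int) : Decidable (Spec_decreasing_subsequences arr out) := by unfold Spec_decreasing_subsequences; infer_instance

-- ===== CLAIM (what is proved, stated in full; the proofs are below) =====
def Claim_equal_decreasing_subsequences : Prop := ∀ (arr : List Int), Dom_decreasing_subsequences arr → Spec_decreasing_subsequences arr (decreasing_subsequences arr)

-- ===== LEMMAS AND PROOFS =====

-- B's inner scan (max dp-length among entries with value ≤ num) and final scan (max dp-length).
def pvBestLe (s : List (Int × Int)) (num : Int) (b : Int) : Int :=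
  s.foldl (fun b vd => if vd.1 ≤ num ∧ b < vd.2 then vd.2 else b) b

def pvMaxAll (s : List (Int × Int)) (b : Int) : Int :=
  s.foldl (fun b vd => if b < vd.2 then vd.2 else b) b

lemma bestLe_init_le (s : List (Int × Int)) (num b : Int) : b ≤ pvBestLe s num b := by
  induction s generalizing b with
  | nil => simp [pvBestLe]
  | cons p s ih =>
    simp only [pvBestLe, List.foldl_cons]
    refine le_trans ?_ (ih (if p.1 ≤ num ∧ b < p.2 then p.2 else b))
    split <;> omega

lemma bestLe_ge_mem (s : List (Int × Int)) (num b : Int) :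
    ∀ p ∈ s, p.1 ≤ num → p.2 ≤ pvBestLe s num b := by
  induction s generalizing b with
  | nil => simp
  | cons q s ih =>
    intro p hp hle
    rcases List.mem_cons.1 hp with h | h
    · subst h
      refine le_trans ?_ (bestLe_init_le s num _)
      simp only [pvBestLe]
      split <;> omega
    · exact ih _ p h hle

lemma bestLe_mem_or (s : List (Int × Int)) (num b : Int) :
    pvBestLe s num b = b ∨ ∃ p ∈ s, p.1 ≤ num ∧ p.2 = pvBestLe s num b := by
  induction s generalizing b with
  | nil => left; simp [pvBestLe]
  | cons q s ih =>
    have h := ih (if q.1 ≤ num ∧ b < q.2 then q.2 else b)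
    have hfold : pvBestLe (q :: s) num b = pvBestLe s num (if q.1 ≤ num ∧ b < q.2 then q.2 else b) := rfl
    rcases h with h | ⟨p, hp, h1, h2⟩
    · by_cases hc : q.1 ≤ num ∧ b < q.2
      · right; exact ⟨q, List.mem_cons_self .., hc.1, by rw [hfold, h]; simp [hc]⟩
      · left; rw [hfold, h]; simp [hc]
    · right; exact ⟨p, List.mem_cons_of_mem _ hp, h1, by rw [hfold]; exact h2⟩

lemma maxAll_init_le (s : List (Int × Int)) (b : Int) : b ≤ pvMaxAll s b := by
  induction s generalizing b with
  | nil => simp [pvMaxAll]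
  | cons p s ih =>
    simp only [pvMaxAll, List.foldl_cons]
    refine le_trans ?_ (ih (if b < p.2 then p.2 else b))
    split <;> omega

lemma maxAll_ge_mem (s : List (Int × Int)) (b : Int) :
    ∀ p ∈ s, p.2 ≤ pvMaxAll s b := by
  induction s generalizing b with
  | nil => simp
  | cons q s ih =>
    intro p hp
    rcases List.mem_cons.1 hp with h | h
    · subst h
      refine le_trans ?_ (maxAll_init_le s _)
      simp only [pvMaxAll]
      split <;> omega
    · exact ih _ p h

lemma maxAll_append (s : List (Int × Int)) (p : Int × Int) (b : Int) :
    pvMaxAll (s ++ [p]) b = if pvMaxAll s b < p.2 then p.2 else pvMaxAll s b := by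
  simp [pvMaxAll, List.foldl_append]

-- takeWhile facts, getElem?-style.
lemma tw_lt (q : Int → Bool) (l : List Int) :
    ∀ i t, i < (l.takeWhile q).length → l[i]? = some t → q t = true := by
  induction l with
  | nil => simp
  | cons a l ih =>
    intro i t hi ht
    by_cases ha : q a
    · cases i with
      | zero => simp at ht; subst ht; exact ha
      | succ i =>
        simp only [List.takeWhile_cons, ha, if_true, List.length_cons, Nat.succ_lt_succ_iff] at hi
        exact ih i t hi (by simpa using ht)
    · simp [ha] at hi

lemma tw_at (q : Int → Bool) (l : List Int) :
    ∀ t, l[(l.takeWhile q).length]? = some t → q t = false := by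
  induction l with
  | nil => simp
  | cons a l ih =>
    intro t ht
    by_cases ha : q a
    · simp only [List.takeWhile_cons, ha, if_true, List.length_cons] at ht
      exact ih t (by simpa using ht)
    · simp only [List.takeWhile_cons, ha, if_false] at ht
      simp at ht
      subst ht
      simpa using ha

lemma tw_le_length (q : Int → Bool) (l : List Int) : (l.takeWhile q).length ≤ l.length := by
  induction l with
  | nil => simp
  | cons a l ih =>
    by_cases ha : q a <;> simp [List.takeWhile_cons, ha] <;> omega

lemma tw_ge (q : Int → Bool) (l : List Int) (b : Nat) (hb : b ≤ l.length)
    (h : ∀ i t, i < b → l[i]? = some t → q t = true) : b ≤ (l.takeWhile q).length := by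
  by_contra hlt
  push_neg at hlt
  have hpos : (l.takeWhile q).length < l.length := lt_of_lt_of_le hlt hb
  obtain ⟨t, ht⟩ : ∃ t, l[(l.takeWhile q).length]? = some t := by
    exact ⟨l[(l.takeWhile q).length], List.getElem?_eq_getElem hpos⟩
  have h1 := h _ t hlt ht
  have h2 := tw_at q l t ht
  simp [h1] at h2

-- The coupling invariant between A's pile tails and B's dp table:
-- tails is sorted; tails[k] is the least value among dp entries of length ≥ k+1;
-- tails.length is the largest dp length.
def pvInv (tails : List Int) (s : List (Int × Int)) : Prop :=
  (∀ (i j : Nat) (a b : Int), i < j → tails[i]? = some a → tails[j]? = some b → a ≤ b) ∧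
  (∀ (k : Nat) (t : Int), tails[k]? = some t →
      (∃ p ∈ s, (k : Int) + 1 ≤ p.2 ∧ p.1 = t) ∧
      (∀ p ∈ s, (k : Int) + 1 ≤ p.2 → t ≤ p.1)) ∧
  ((tails.length : Int) = pvMaxAll s 0)

lemma pos_eq_best (tails : List Int) (s : List (Int × Int)) (num : Int) (h : pvInv tails s) :
    (pvBisectRight tails num : Int) = pvBestLe s num 0 := by
  obtain ⟨hsort, hmin, hlen⟩ := h
  set q : Int → Bool := fun t => decide (t ≤ num) with hq
  set pos := pvBisectRight tails num with hposdef
  set best := pvBestLe s num 0 with hbest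
  have hposle : pos ≤ tails.length := tw_le_length q tails
  have hpd : pos = (tails.takeWhile q).length := rfl
  have hbest0 : 0 ≤ best := bestLe_init_le s num 0
  -- best ≤ pos
  have h1 : best ≤ (pos : Int) := by
    rcases bestLe_mem_or s num 0 with h0 | ⟨p, hp, hple, hpeq⟩
    · rw [← hbest] at h0; omega
    · by_cases hbp : best ≤ 0
      · omega
      · push_neg at hbp
        have hbl : best ≤ (tails.length : Int) := by
          rw [hlen]; rw [← hbest] at hpeq; rw [← hpeq]; exact maxAll_ge_mem s 0 p hp
        set k : Nat := best.toNat - 1 with hk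
        have hkk : (k : Int) + 1 = best := by omega
        have hklt : k < tails.length := by omega
        obtain ⟨t, ht⟩ : ∃ t, tails[k]? = some t := ⟨tails[k], List.getElem?_eq_getElem hklt⟩
        have htle : t ≤ num := by
          have := (hmin k t ht).2 p hp (by rw [← hbest] at hpeq; omega)
          omega
        -- all earlier entries are ≤ num by sortedness, so takeWhile reaches at least k+1
        have : k + 1 ≤ pos := by
          refine tw_ge q tails (k+1) (by omega) ?_
          intro i u hi hu
          by_cases hik : i = k
          · subst hik; rw [ht] at hu; simp at hu; subst hu; simpa [hq] using htle
          · have hle2 : u ≤ t := hsort i k u t (by omega) hu ht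
            simp [hq]; omega
        omega
  -- pos ≤ best
  have h2 : (pos : Int) ≤ best := by
    by_cases hp0 : pos = 0
    · omega
    · have hklt : pos - 1 < tails.length := by omega
      obtain ⟨t, ht⟩ : ∃ t, tails[pos-1]? = some t := ⟨tails[pos-1], List.getElem?_eq_getElem hklt⟩
      have htle : t ≤ num := by
        have := tw_lt q tails (pos-1) t (by omega) ht
        simpa [hq] using this
      obtain ⟨p, hp, hple, hpeq⟩ := (hmin (pos-1) t ht).1
      have := bestLe_ge_mem s num 0 p hp (by omega)
      rw [← hbest] at this
      omega
  omega

lemma step_inv (tails : List Int) (s : List (Int × Int)) (num : Int) (h : pvInv tails s) :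
    pvInv (pvStepA tails num) (pvStepB s num) := by
  obtain ⟨hsort, hmin, hlen⟩ := h
  set q : Int → Bool := fun t => decide (t ≤ num) with hq
  set pos := pvBisectRight tails num with hposdef
  have hposle : pos ≤ tails.length := tw_le_length q tails
  have hkey : (pos : Int) = pvBestLe s num 0 := pos_eq_best tails s num ⟨hsort, hmin, hlen⟩
  -- facts about elements below / at pos
  have hbelow : ∀ i t, i < pos → tails[i]? = some t → t ≤ num := by
    intro i t hi ht
    have := tw_lt q tails i t hi ht
    simpa [hq] using this
  have hat : ∀ t, tails[pos]? = some t → num < t := by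
    intro t ht
    have := tw_at q tails t ht
    simp [hq] at this
    omega
  -- s' and tails'
  have hs' : pvStepB s num = s ++ [(num, pvBestLe s num 0 + 1)] := rfl
  set s' := pvStepB s num with hs'def
  set tails' := pvStepA tails num with ht'def
  have ht' : tails' = if pos = tails.length then tails ++ [num] else tails.set pos num := rfl
  -- unified getElem? description of tails'
  have hlen' : tails'.length = if pos = tails.length then tails.length + 1 else tails.length := by
    rw [ht']; split <;> simp
  have hget_pos : tails'[pos]? = some num := by
    rw [ht']
    by_cases hc : pos = tails.length
    · simp [hc, List.getElem?_append_right]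
    · have : pos < tails.length := by omega
      simp [hc, List.getElem?_set_self, this]
  have hget_ne : ∀ i, i ≠ pos → tails'[i]? = tails[i]? := by
    intro i hi
    rw [ht']
    by_cases hc : pos = tails.length
    · simp only [hc, if_true]
      by_cases h2 : i < tails.length
      · simp [List.getElem?_append, h2]
      · have hnone : tails[i]? = none := by
          apply List.getElem?_eq_none; omega
        rw [hnone]
        apply List.getElem?_eq_none
        simp; omega
    · simp only [hc, if_false]
      rw [List.getElem?_set_ne (by omega)]
  have hmem' : ∀ p, p ∈ s' → p ∈ s ∨ p = (num, pvBestLe s num 0 + 1) := by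
    intro p hp; rw [hs'] at hp; simpa using hp
  refine ⟨?_, ?_, ?_⟩
  -- sortedness
  · intro i j a b hij ha hb
    by_cases hipos : i = pos
    · subst hipos
      rw [hget_pos] at ha
      injection ha with ha; subst ha
      have hj : j ≠ pos := by omega
      rw [hget_ne j hj] at hb
      -- j > pos, so pos < tails.length
      have hjlt : j < tails.length := by
        by_contra hcon
        rw [List.getElem?_eq_none (by omega)] at hb
        simp at hb
      have hplt : pos < tails.length := by omega
      obtain ⟨t, ht⟩ : ∃ t, tails[pos]? = some t := ⟨tails[pos], List.getElem?_eq_getElem hplt⟩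
      have h1 := hat t ht
      by_cases hjp : j = pos
      · omega
      · have := hsort pos j t b hij ht hb
        omega
    · by_cases hjpos : j = pos
      · subst hjpos
        rw [hget_pos] at hb
        injection hb with hb; subst hb
        rw [hget_ne i hipos] at ha
        exact hbelow i a (by omega) ha
      · rw [hget_ne i hipos] at ha
        rw [hget_ne j hjpos] at hb
        exact hsort i j a b hij ha hb
  -- min-tail characterization
  · intro k t ht
    by_cases hkpos : k = pos
    · subst hkpos
      rw [hget_pos] at ht
      injection ht with ht; subst ht
      constructor
      · refine ⟨(num, pvBestLe s num 0 + 1), ?_, by simp; omega, rfl⟩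
        rw [hs']; simp
      · intro p hp hple
        rcases hmem' p hp with hmem | hmem
        · -- p.2 ≥ pos+1 and p ∈ s forces num < p.1
          by_contra hcon
          push_neg at hcon
          have := bestLe_ge_mem s num 0 p hmem (by omega)
          omega
        · subst hmem; simp
    · rw [hget_ne k hkpos] at ht
      obtain ⟨⟨p, hp, h1, h2⟩, hall⟩ := hmin k t ht
      constructor
      · exact ⟨p, by rw [hs']; exact List.mem_append_left _ hp, h1, h2⟩
      · intro p' hp' hple
        rcases hmem' p' hp' with hmem | hmem
        · exact hall p' hmem hple
        · subst hmem
          simp only at hple ⊢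
          -- k+1 ≤ pos+1 and k ≠ pos, so k < pos: tails[k] ≤ num
          have hklt : k < pos := by omega
          exact hbelow k t hklt ht
  -- length = max dp
  · rw [hs', maxAll_append, hlen']
    by_cases hc : pos = tails.length
    · simp only [hc, if_true]
      have : pvMaxAll s 0 < pvBestLe s num 0 + 1 := by omega
      rw [if_pos (by omega)]
      push_cast
      omega
    · simp only [hc, if_false]
      rw [if_neg (by omega)]
      exact hlen

lemma fold_inv (arr : List Int) :
    ∀ (tails : List Int) (s : List (Int × Int)), pvInv tails s →
      pvInv (arr.foldl pvStepA tails) (arr.foldl pvStepB s) := by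
  induction arr with
  | nil => intro tails s h; simpa using h
  | cons num arr ih =>
    intro tails s h
    simpa using ih _ _ (step_inv tails s num h)

lemma inv_nil : pvInv [] [] := by
  refine ⟨?_, ?_, ?_⟩ <;> simp [pvMaxAll]

lemma main_eq (arr : List Int) : decreasing_subsequences arr = decreasing_subsequences_alt arr := by
  have hinv := fold_inv arr [] [] inv_nil
  have halt : decreasing_subsequences_alt arr = pvMaxAll (arr.foldl pvStepB []) 0 := rfl
  by_cases hsmall : arr.length < 2
  · match arr, hsmall with
    | [], _ => rfl
    | [a], _ =>
      show (1 : Int) = decreasing_subsequences_alt [a]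
      simp [decreasing_subsequences_alt, pvStepB, pvMaxAll]
  · unfold decreasing_subsequences
    rw [if_neg hsmall, halt]
    exact hinv.2.2

-- ===== VERDICT (by name: the statement is the Claim_ definition above) =====
theorem decreasing_subsequences_spec : Claim_equal_decreasing_subsequences := by
  intro arr _
  exact main_eq arr
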